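-- pv_equiv track=rewrite | github.com/dainrainlc-art/AgentForge | agentforge/social/content_adapter.py | _split_to_thread
-- ===== SOURCE A (Python) =====
-- from typing import Dict, Any, List, Optional
--
-- def _split_to_thread(
--
--     content: str,
--     max_chars: int
-- ) -> List[str]:
--     """Split long content into thread parts"""
--
--     sentences = content.replace('\n', ' ').split('. ')
--     threads = []
--     current_thread = ""
--
--     for sentence in sentences:
--         sentence = sentence.strip()
--         if not sentence:
--             continue
--
--         if not sentence.endswith('.'):
--             sentence += '.'
--
--         if len(current_thread) + len(sentence) + 1 <= max_chars - 10:
--             current_thread += sentence + " "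
--         else:
--             if current_thread:
--                 threads.append(current_thread.strip())
--             current_thread = sentence + " "
--
--     if current_thread:
--         threads.append(current_thread.strip())
--
--     for i, thread in enumerate(threads):
--         if len(threads) > 1:
--             threads[i] = f"{i+1}/{len(threads)} {thread}"
--
--     return threads
-- ===== SOURCE B (Python) =====
-- def _split_to_thread(content, max_chars):
--     # Pass 1: normalized sentence list.
--     sentences = []
--     for raw in content.replace('\n', ' ').split('. '):
--         s = raw.strip()
--         if s:
--             sentences.append(s if s.endswith('.') else s + '.')
--     n = len(sentences)
--
--     # Pass 2: prefix sums of sentence weights (len + 1 for the separating space).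
--     cum = [0]
--     t = 0
--     for s in sentences:
--         t += len(s) + 1
--         cum.append(t)
--
--     # Pass 3: segment by binary search on the prefix-sum array: each group starting
--     # at i extends to the last m with cum[m] <= cum[i] + budget (at least one sentence).
--     budget = max_chars - 10
--     groups = []
--     i = 0
--     while i < n:
--         target = cum[i] + budget
--         lo = i + 1
--         hi = n + 1
--         while lo < hi:
--             mid = (lo + hi) // 2
--             if cum[mid] <= target:
--                 lo = mid + 1
--             else:
--                 hi = mid
--         end = max(lo - 1, i + 1)
--         groups.append(" ".join(sentences[i:end]))
--         i = end
--
--     # Pass 4: numbering.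
--     if len(groups) > 1:
--         return [f"{k+1}/{len(groups)} {g}" for k, g in enumerate(groups)]
--     return groups
-- ===== Notes on version B (the rewrite author's own statement) =====
-- stated objective: alternative
-- what changed: Replaces A's single fused string-accumulator loop by staged passes over a new data structure: normalize sentences into a list, build a prefix-sum array of sentence weights, find each group's end by binary search on that array (taking a sentence slice and joining it), then number the groups.
import Mathlib
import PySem

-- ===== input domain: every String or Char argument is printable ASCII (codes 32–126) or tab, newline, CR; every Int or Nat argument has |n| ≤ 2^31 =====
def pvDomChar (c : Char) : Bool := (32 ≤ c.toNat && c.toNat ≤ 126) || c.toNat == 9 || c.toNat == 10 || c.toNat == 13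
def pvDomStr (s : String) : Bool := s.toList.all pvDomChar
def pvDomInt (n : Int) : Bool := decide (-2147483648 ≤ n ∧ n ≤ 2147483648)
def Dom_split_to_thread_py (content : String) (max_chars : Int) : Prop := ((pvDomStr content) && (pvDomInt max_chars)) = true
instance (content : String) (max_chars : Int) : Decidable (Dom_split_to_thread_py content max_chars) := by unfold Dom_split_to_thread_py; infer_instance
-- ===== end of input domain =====

-- B replaces A's fused string-accumulator loop by staged passes: normalize sentences into a list,
-- build a prefix-sum array of sentence weights, find each group's end by binary search on it,
-- slice-and-join each group, then number; alternative decomposition/data structure, same results.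


-- ===== PORT A =====
-- loop body of A's for-loop: state = (threads, current_thread), both as List Char
def pvStepA (max_chars : Int) (st : List (List Char) × List Char) (sentence : List Char) :
    List (List Char) × List Char :=
  let sentence := PySem.Chars.strip sentence
  if sentence = [] then st
  else
    let sentence := if PySem.Chars.endswith sentence ['.'] then sentence else sentence ++ ['.']
    if (st.2.length : Int) + (sentence.length : Int) + 1 ≤ max_chars - 10 then
      (st.1, st.2 ++ sentence ++ [' '])
    else if st.2 ≠ [] then
      (st.1 ++ [PySem.Chars.strip st.2], sentence ++ [' '])
    else
      (st.1, sentence ++ [' '])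

def split_to_thread_py (content : String) (max_chars : Int) : List String :=
  let sentences := PySem.Chars.splitOn (PySem.Chars.replace content.toList ['\n'] [' ']) ['.', ' ']
  let st := sentences.foldl (pvStepA max_chars) ([], [])
  let threads := if st.2 ≠ [] then st.1 ++ [PySem.Chars.strip st.2] else st.1
  let threads :=
    if threads.length > 1 then
      (PySem.List.enumerate threads).map (fun p =>
        (PySem.Int.toStr (p.1 + 1)).toList ++ '/' ::
          (PySem.Int.toStr (threads.length : Int)).toList ++ ' ' :: p.2)
    else threads
  threads.map String.ofList

-- ===== PORT B =====
-- pass-1 loop body: strip, drop empties, ensure a trailing '.'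
def pvNormStep (acc : List (List Char)) (raw : List Char) : List (List Char) :=
  let s := PySem.Chars.strip raw
  if s = [] then acc
  else acc ++ [if PySem.Chars.endswith s ['.'] then s else s ++ ['.']]

-- cum[m] (index is always in range when B reads it; getD 0 only makes the access total)
def pvCumAt (cum : List Int) (m : Int) : Int := (PySem.List.pyGet? cum m).getD 0

-- Source B's inner while loop: hand-written binary search for the first m in [lo, hi) with
-- cum[m] > target (else hi); the Nat argument is fuel (≥ hi - lo iterations), a totality guard
def pvBS (cum : List Int) (target : Int) : Nat → Int → Int → Int
  | 0, lo, _ => lo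
  | fuel + 1, lo, hi =>
    if lo < hi then
      let mid := PySem.Int.floordiv (lo + hi) 2
      if pvCumAt cum mid ≤ target then pvBS cum target fuel (mid + 1) hi
      else pvBS cum target fuel lo mid
    else lo

-- Source B's outer while loop: emit one group per iteration, jump i to the group's end;
-- the Nat argument is fuel (≥ the number of iterations), a totality guard
def pvOuterB (cum : List Int) (ss : List (List Char)) (budget : Int) (n : Int) :
    Nat → Int → List (List Char)
  | 0, _ => []
  | fuel + 1, i =>
    if i < n then
      let target := pvCumAt cum i + budget
      let lo := pvBS cum target (n + 1 - (i + 1)).toNat (i + 1) (n + 1)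
      let e := max (lo - 1) (i + 1)
      PySem.Chars.join [' '] (PySem.List.slice ss (some i) (some e))
        :: pvOuterB cum ss budget n fuel e
    else []

def split_to_thread_py_alt (content : String) (max_chars : Int) : List String :=
  let sentences :=
    (PySem.Chars.splitOn (PySem.Chars.replace content.toList ['\n'] [' ']) ['.', ' ']).foldl
      pvNormStep []
  let n : Int := sentences.length
  let cum := (sentences.foldl
    (fun (st : List Int × Int) s =>
      let t := st.2 + (s.length : Int) + 1; (st.1 ++ [t], t)) ([0], 0)).1
  let groups := pvOuterB cum sentences (max_chars - 10) n sentences.length 0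
  let groups :=
    if groups.length > 1 then
      (PySem.List.enumerate groups).map (fun p =>
        (PySem.Int.toStr (p.1 + 1)).toList ++ '/' ::
          (PySem.Int.toStr (groups.length : Int)).toList ++ ' ' :: p.2)
    else groups
  groups.map String.ofList

-- ===== PRECONDITION & SPEC =====
def Spec_split_to_thread_py (content : String) (max_chars : Int) (out : List String) : Prop := out = split_to_thread_py_alt content max_chars
instance (content : String) (max_chars : Int) (out : List String) : Decidable (Spec_split_to_thread_py content max_chars out) := by unfold Spec_split_to_thread_py; infer_instance

-- ===== CLAIM (what is proved, stated in full; the proofs are below) =====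
def Claim_equal_split_to_thread_py : Prop := ∀ (content : String) (max_chars : Int), Dom_split_to_thread_py content max_chars → Spec_split_to_thread_py content max_chars (split_to_thread_py content max_chars)

-- ===== LEMMAS AND PROOFS =====

-- a "good" chunk: nonempty, no leading and no trailing whitespace
def pvGood (s : List Char) : Prop :=
  PySem.Chars.lstrip s = s ∧ PySem.Chars.rstrip s = s ∧ s ≠ []

-- normalization of one raw piece as an Option (proof-side view of pvNormStep / A's skip)
def pvNormalize (raw : List Char) : Option (List Char) :=
  let s := PySem.Chars.strip raw
  if s = [] then none
  else some (if PySem.Chars.endswith s ['.'] then s else s ++ ['.'])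

lemma pv_normStep_filterMap : ∀ (l : List (List Char)) (acc : List (List Char)),
    l.foldl pvNormStep acc = acc ++ l.filterMap pvNormalize := by
  intro l
  induction l with
  | nil => simp
  | cons a l ih =>
    intro acc
    by_cases he : PySem.Chars.strip a = [] <;>
      simp [pvNormStep, pvNormalize, he, ih]

lemma pv_dropWhile_idem (p : Char → Bool) (l : List Char) :
    List.dropWhile p (List.dropWhile p l) = List.dropWhile p l := by
  induction l with
  | nil => simp
  | cons a l ih =>
    by_cases h : p a = true
    · simp [h, ih]
    · simp [h]

lemma pv_rstrip_append_eq (Y : List Char) :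
    PySem.Chars.rstrip Y ++ ((List.takeWhile PySem.Chars.isspace Y.reverse).reverse) = Y := by
  have h : (List.takeWhile PySem.Chars.isspace Y.reverse) ++
      (List.dropWhile PySem.Chars.isspace Y.reverse) = Y.reverse :=
    List.takeWhile_append_dropWhile
  simp only [PySem.Chars.rstrip]
  rw [← List.reverse_append, h, List.reverse_reverse]

lemma pv_good_strip (raw : List Char) (h : PySem.Chars.strip raw ≠ []) :
    pvGood (PySem.Chars.strip raw) := by
  refine ⟨?_, ?_, h⟩
  · set Z := PySem.Chars.lstrip raw with hZ
    have hZZ : List.dropWhile PySem.Chars.isspace Z = Z := by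
      simpa [PySem.Chars.lstrip] using pv_dropWhile_idem PySem.Chars.isspace raw
    have hpre := pv_rstrip_append_eq Z
    set R := PySem.Chars.rstrip Z with hR
    set t := (List.takeWhile PySem.Chars.isspace Z.reverse).reverse with ht
    have hRt : R ++ t = Z := hpre
    have hstrip : PySem.Chars.strip raw = R := by
      simp [PySem.Chars.strip, hZ, hR]
    rw [hstrip] at h ⊢
    show PySem.Chars.lstrip R = R
    have hdw : List.dropWhile PySem.Chars.isspace (R ++ t) = Z := by rw [hRt, hZZ]
    rw [List.dropWhile_append] at hdw
    by_cases hemp : (List.dropWhile PySem.Chars.isspace R).isEmpty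
    · rw [if_pos hemp] at hdw
      have h1 : Z.length ≤ t.length := by
        rw [← hdw]; exact List.length_dropWhile_le _ _
      have h2 : Z.length = R.length + t.length := by
        rw [← hRt]; simp
      have h3 : R.length = 0 := by omega
      exact absurd (List.eq_nil_of_length_eq_zero h3) h
    · rw [if_neg hemp] at hdw
      have := hdw.trans hRt.symm
      have := List.append_left_injective t this
      simpa [PySem.Chars.lstrip] using this
  · simp [PySem.Chars.strip, PySem.Chars.rstrip, pv_dropWhile_idem]

lemma pv_space_isspace : PySem.Chars.isspace ' ' = true := by decide

lemma pv_dot_isspace : PySem.Chars.isspace '.' = false := by decide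

lemma pv_dropWhile_eq_self_of_lstrip {X : List Char} (h : PySem.Chars.lstrip X = X) :
    List.dropWhile PySem.Chars.isspace X = X := by simpa [PySem.Chars.lstrip] using h

lemma pv_lstrip_append {X Y : List Char} (h : PySem.Chars.lstrip X = X) (hne : X ≠ []) :
    PySem.Chars.lstrip (X ++ Y) = X ++ Y := by
  have hd := pv_dropWhile_eq_self_of_lstrip h
  simp only [PySem.Chars.lstrip, List.dropWhile_append, hd]
  rw [if_neg (by simpa [List.isEmpty_iff] using hne)]

lemma pv_rstrip_append {X Y : List Char} (h : PySem.Chars.rstrip Y = Y) (hne : Y ≠ []) :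
    PySem.Chars.rstrip (X ++ Y) = X ++ Y := by
  have hd : List.dropWhile PySem.Chars.isspace Y.reverse = Y.reverse := by
    have : (List.dropWhile PySem.Chars.isspace Y.reverse).reverse = Y := h
    calc List.dropWhile PySem.Chars.isspace Y.reverse
        = (List.dropWhile PySem.Chars.isspace Y.reverse).reverse.reverse := by simp
      _ = Y.reverse := by rw [this]
  simp only [PySem.Chars.rstrip, List.reverse_append, List.dropWhile_append, hd]
  rw [if_neg (by simpa [List.isEmpty_iff] using hne)]
  simp

lemma pv_good_append_dot {s : List Char} (h : pvGood s) : pvGood (s ++ ['.']) := by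
  obtain ⟨hl, hr, hne⟩ := h
  refine ⟨pv_lstrip_append hl hne, ?_, by simp⟩
  refine pv_rstrip_append ?_ (by simp)
  simp [PySem.Chars.rstrip, pv_dot_isspace]

lemma pv_good_normalize {raw s : List Char} (h : pvNormalize raw = some s) : pvGood s := by
  unfold pvNormalize at h
  by_cases he : PySem.Chars.strip raw = []
  · simp [he] at h
  · simp only [he, if_false] at h
    have hg := pv_good_strip raw he
    split at h
    · simpa [← Option.some_inj.mp h] using hg
    · rw [← Option.some_inj.mp h]; exact pv_good_append_dot hg

lemma pv_good_glue {X Y : List Char} (hX : pvGood X) (hY : pvGood Y) :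
    pvGood (X ++ ' ' :: Y) := by
  obtain ⟨hXl, _, hXne⟩ := hX
  obtain ⟨_, hYr, hYne⟩ := hY
  refine ⟨pv_lstrip_append hXl hXne, ?_, by simp⟩
  have : X ++ ' ' :: Y = (X ++ [' ']) ++ Y := by simp
  rw [this]
  exact pv_rstrip_append hYr hYne

-- join/flatten facts for a nonempty group of good chunks
lemma pv_join_good : ∀ (group : List (List Char)), group ≠ [] → (∀ g ∈ group, pvGood g) →
    pvGood (PySem.Chars.join [' '] group) ∧
      (group.map (· ++ [' '])).flatten = PySem.Chars.join [' '] group ++ [' '] := by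
  intro group
  induction group with
  | nil => intro h; exact absurd rfl h
  | cons g rest ih =>
    intro _ hgood
    cases rest with
    | nil =>
      refine ⟨?_, by simp [PySem.Chars.join, List.intercalate]⟩
      simpa [PySem.Chars.join, List.intercalate] using hgood g (by simp)
    | cons h t =>
      have hrest := ih (by simp) (fun x hx => hgood x (by simp [hx]))
      have hjoin : PySem.Chars.join [' '] (g :: h :: t)
          = g ++ ' ' :: PySem.Chars.join [' '] (h :: t) := by
        simp [PySem.Chars.join, List.intercalate, List.intersperse]
      constructor
      · rw [hjoin]
        exact pv_good_glue (hgood g (by simp)) hrest.1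
      · rw [hjoin]
        have : ((g :: h :: t).map (· ++ [' '])).flatten
            = (g ++ [' ']) ++ ((h :: t).map (· ++ [' '])).flatten := by simp
        rw [this, hrest.2]
        simp

lemma pv_strip_append_space {X : List Char} (h : pvGood X) :
    PySem.Chars.strip (X ++ [' ']) = X := by
  obtain ⟨hl, hr, hne⟩ := h
  have h1 : PySem.Chars.lstrip (X ++ [' ']) = X ++ [' '] := pv_lstrip_append hl hne
  have h2 : PySem.Chars.rstrip (X ++ [' ']) = X := by
    simp only [PySem.Chars.rstrip, List.reverse_append, List.reverse_cons, List.reverse_nil,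
      List.nil_append, List.singleton_append, List.dropWhile_cons, pv_space_isspace]
    simpa [PySem.Chars.rstrip] using hr
  simp [PySem.Chars.strip, h1, h2]

-- A's fold over the raw pieces = A's normalized step folded over the normalized sentence list
def pvStepA' (max_chars : Int) (st : List (List Char) × List Char) (s : List Char) :
    List (List Char) × List Char :=
  if (st.2.length : Int) + (s.length : Int) + 1 ≤ max_chars - 10 then
    (st.1, st.2 ++ s ++ [' '])
  else if st.2 ≠ [] then
    (st.1 ++ [PySem.Chars.strip st.2], s ++ [' '])
  else
    (st.1, s ++ [' '])

lemma pv_stepA_eq (mc : Int) (st : List (List Char) × List Char) (raw : List Char) :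
    pvStepA mc st raw = (pvNormalize raw).elim st (pvStepA' mc st) := by
  unfold pvStepA pvNormalize pvStepA'
  by_cases he : PySem.Chars.strip raw = [] <;> simp [he]

lemma pv_foldl_filterMap {α β γ : Type} (g : α → Option β) (f : γ → β → γ)
    (l : List α) (init : γ) :
    (l.filterMap g).foldl f init
      = l.foldl (fun st x => (g x).elim st (f st)) init := by
  induction l generalizing init with
  | nil => simp
  | cons a l ih =>
    cases hg : g a <;> simp [hg, ih]

-- ===== grouping as sentence lists (the common intermediate of both programs) =====

-- weight of a list of sentences: sum of len+1
def pvW (l : List (List Char)) : Int := (l.map (fun s => (s.length : Int) + 1)).sum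

@[simp] lemma pvW_nil : pvW [] = 0 := by simp [pvW]

@[simp] lemma pvW_cons (x : List Char) (l : List (List Char)) :
    pvW (x :: l) = ((x.length : Int) + 1) + pvW l := by simp [pvW]

@[simp] lemma pvW_append (l1 l2 : List (List Char)) :
    pvW (l1 ++ l2) = pvW l1 + pvW l2 := by simp [pvW]

lemma pvW_nonneg (l : List (List Char)) : 0 ≤ pvW l := by
  induction l with
  | nil => simp
  | cons x l ih => simp; omega

-- how many further sentences the greedy rule packs into the current group
def pvCount (b : Int) (tot : Int) : List (List Char) → Nat
  | [] => 0
  | t :: ts => if tot + (t.length : Int) + 1 > b then 0 else 1 + pvCount b (tot + (t.length : Int) + 1) ts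

lemma pvCount_le (b : Int) : ∀ (rest : List (List Char)) (tot : Int),
    pvCount b tot rest ≤ rest.length := by
  intro rest
  induction rest with
  | nil => intro tot; simp [pvCount]
  | cons t ts ih =>
    intro tot
    by_cases hgt : tot + (t.length : Int) + 1 > b
    · simp [pvCount, hgt]
    · simp only [pvCount, if_neg hgt, List.length_cons]
      have := ih (tot + (t.length : Int) + 1)
      omega

lemma pvCount_take (b : Int) : ∀ (rest : List (List Char)) (tot : Int),
    0 < pvCount b tot rest → tot + pvW (rest.take (pvCount b tot rest)) ≤ b := by
  intro rest
  induction rest with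
  | nil => intro tot h; simp [pvCount] at h
  | cons t ts ih =>
    intro tot hpos
    by_cases hgt : tot + (t.length : Int) + 1 > b
    · simp [pvCount, hgt] at hpos
    · simp only [pvCount, if_neg hgt]
      by_cases hc : 0 < pvCount b (tot + (t.length : Int) + 1) ts
      · have := ih (tot + (t.length : Int) + 1) hc
        simp only [Nat.add_comm 1, List.take_succ_cons, pvW_cons]
        omega
      · have hc0 : pvCount b (tot + (t.length : Int) + 1) ts = 0 := by omega
        simp [hc0]
        omega

lemma pvCount_over (b : Int) : ∀ (rest : List (List Char)) (tot : Int),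
    pvCount b tot rest < rest.length →
      b < tot + pvW (rest.take (pvCount b tot rest + 1)) := by
  intro rest
  induction rest with
  | nil => intro tot h; simp at h
  | cons t ts ih =>
    intro tot h
    by_cases hgt : tot + (t.length : Int) + 1 > b
    · simp [pvCount, hgt]; omega
    · simp only [pvCount, if_neg hgt] at h ⊢
      simp only [List.length_cons] at h
      have hlt : pvCount b (tot + (t.length : Int) + 1) ts < ts.length := by omega
      have hih := ih (tot + (t.length : Int) + 1) hlt
      rw [show 1 + pvCount b (tot + (t.length : Int) + 1) ts + 1
          = (pvCount b (tot + (t.length : Int) + 1) ts + 1) + 1 from by omega,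
        List.take_succ_cons, pvW_cons]
      omega

-- greedy segmentation of the sentence list
def pvChop (b : Int) : List (List Char) → List (List (List Char))
  | [] => []
  | s :: rest =>
    (s :: rest.take (pvCount b ((s.length : Int) + 1) rest))
      :: pvChop b (rest.drop (pvCount b ((s.length : Int) + 1) rest))
termination_by l => l.length
decreasing_by
  have := List.length_drop (l := rest) (i := pvCount b ((s.length : Int) + 1) rest)
  simp only [List.length_cons]
  omega

lemma pvChop_nil (b : Int) : pvChop b [] = [] := by rw [pvChop]

lemma pvChop_cons (b : Int) (s : List Char) (rest : List (List Char)) :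
    pvChop b (s :: rest)
      = (s :: rest.take (pvCount b ((s.length : Int) + 1) rest))
          :: pvChop b (rest.drop (pvCount b ((s.length : Int) + 1) rest)) := by
  rw [pvChop]

-- group-level step: the greedy rule with groups kept as sentence lists
def pvStepG (b : Int) (st : List (List (List Char)) × List (List Char) × Int) (s : List Char) :
    List (List (List Char)) × List (List Char) × Int :=
  if st.2.1 ≠ [] ∧ st.2.2 + (s.length : Int) + 1 > b then
    (st.1 ++ [st.2.1], [s], (s.length : Int) + 1)
  else (st.1, st.2.1 ++ [s], st.2.2 + (s.length : Int) + 1)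

def pvFlushG (st : List (List (List Char)) × List (List Char) × Int) :
    List (List (List Char)) :=
  if st.2.1 ≠ [] then st.1 ++ [st.2.1] else st.1

lemma pv_fold_chop (b : Int) : ∀ (ss : List (List Char)) (gs : List (List (List Char)))
    (cur : List (List Char)) (tot : Int), cur ≠ [] →
    pvFlushG (ss.foldl (pvStepG b) (gs, cur, tot))
      = gs ++ (cur ++ ss.take (pvCount b tot ss)) :: pvChop b (ss.drop (pvCount b tot ss)) := by
  intro ss
  induction ss with
  | nil =>
    intro gs cur tot hcur
    simp [pvFlushG, pvCount, pvChop_nil, hcur]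
  | cons t ts ih =>
    intro gs cur tot hcur
    by_cases hgt : tot + (t.length : Int) + 1 > b
    · have hstep : pvStepG b (gs, cur, tot) t = (gs ++ [cur], [t], (t.length : Int) + 1) := by
        simp [pvStepG, hcur, hgt]
      rw [List.foldl_cons, hstep, ih (gs ++ [cur]) [t] _ (by simp)]
      simp only [pvCount, if_pos hgt, List.take_zero, List.drop_zero]
      rw [pvChop_cons]
      simp
    · have hstep : pvStepG b (gs, cur, tot) t
          = (gs, cur ++ [t], tot + (t.length : Int) + 1) := by
        simp [pvStepG, hgt]
      rw [List.foldl_cons, hstep, ih gs (cur ++ [t]) _ (by simp)]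
      simp only [pvCount, if_neg hgt, Nat.add_comm 1, List.take_succ_cons, List.drop_succ_cons]
      simp

lemma pv_fold_chop_init (b : Int) (ss : List (List Char)) :
    pvFlushG (ss.foldl (pvStepG b) ([], [], 0)) = pvChop b ss := by
  cases ss with
  | nil => simp [pvFlushG, pvChop_nil]
  | cons s rest =>
    have hstep : pvStepG b ([], [], 0) s = ([], [s], (s.length : Int) + 1) := by
      simp [pvStepG]
    rw [List.foldl_cons, hstep, pv_fold_chop b rest [] [s] _ (by simp), pvChop_cons]
    simp

-- the coupling invariant between A's state and the group-level state
def pvInv (a : List (List Char) × List Char)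
    (g : List (List (List Char)) × List (List Char) × Int) : Prop :=
  a.1 = g.1.map (PySem.Chars.join [' ']) ∧ a.2 = (g.2.1.map (· ++ [' '])).flatten ∧
    g.2.2 = (a.2.length : Int) ∧ ∀ x ∈ g.2.1, pvGood x

lemma pv_step_inv (mc : Int) {a : List (List Char) × List Char}
    {g : List (List (List Char)) × List (List Char) × Int} {s : List Char}
    (hinv : pvInv a g) (hs : pvGood s) :
    pvInv (pvStepA' mc a s) (pvStepG (mc - 10) g s) := by
  obtain ⟨h1, h2, h3, h4⟩ := hinv
  unfold pvStepA' pvStepG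
  by_cases hle : (a.2.length : Int) + (s.length : Int) + 1 ≤ mc - 10
  · have hg : ¬ (g.2.1 ≠ [] ∧ g.2.2 + (s.length : Int) + 1 > mc - 10) := by
      rw [h3]; omega
    rw [if_pos hle, if_neg hg]
    refine ⟨h1, ?_, ?_, ?_⟩
    · simp [h2]
    · simp [h3]; ring
    · intro x hx
      rcases List.mem_append.mp hx with hx | hx
      · exact h4 x hx
      · simp at hx; subst hx; exact hs
  · rw [if_neg hle]
    by_cases hcur : a.2 = []
    · have hgrp : g.2.1 = [] := by
        by_contra hne
        obtain ⟨x, rest, hgr⟩ := List.exists_cons_of_ne_nil hne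
        have hxne : x ≠ [] := (h4 x (by rw [hgr]; simp)).2.2
        have hne2 : a.2 ≠ [] := by
          rw [h2, hgr]
          simp only [List.map_cons, List.flatten_cons, ne_eq, List.append_assoc]
          intro hcontra
          exact hxne (List.append_eq_nil_iff.mp hcontra).1
        exact hne2 hcur
      have hg : ¬ (g.2.1 ≠ [] ∧ g.2.2 + (s.length : Int) + 1 > mc - 10) := by
        simp [hgrp]
      rw [if_neg (by simp [hcur]), if_neg hg]
      refine ⟨h1, by simp [hgrp], ?_, ?_⟩
      · simp [h3, hcur]
      · intro x hx
        rcases (by simpa [hgrp] using hx : x = s) with rfl; exact hs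
    · have hgrp : g.2.1 ≠ [] := by
        intro hcontra
        rw [h2, hcontra] at hcur; simp at hcur
      have hg : g.2.1 ≠ [] ∧ g.2.2 + (s.length : Int) + 1 > mc - 10 :=
        ⟨hgrp, by rw [h3]; omega⟩
      have hjoin := pv_join_good g.2.1 hgrp h4
      have hstrip : PySem.Chars.strip a.2 = PySem.Chars.join [' '] g.2.1 := by
        rw [h2, hjoin.2]
        exact pv_strip_append_space hjoin.1
      rw [if_pos hcur, if_pos hg]
      refine ⟨?_, ?_, ?_, ?_⟩
      · simp [h1, hstrip]
      · simp
      · simp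
      · intro x hx; simp at hx; subst hx; exact hs

lemma pv_fold_inv (mc : Int) : ∀ (l : List (List Char))
    {a : List (List Char) × List Char}
    {g : List (List (List Char)) × List (List Char) × Int},
    (∀ s ∈ l, pvGood s) → pvInv a g →
    pvInv (l.foldl (pvStepA' mc) a) (l.foldl (pvStepG (mc - 10)) g) := by
  intro l
  induction l with
  | nil => intro a g _ h; simpa using h
  | cons s t ih =>
    intro a g hgood hinv
    simp only [List.foldl_cons]
    exact ih (fun x hx => hgood x (by simp [hx])) (pv_step_inv mc hinv (hgood s (by simp)))

-- ===== prefix sums and binary search =====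

def pvCumF (ss : List (List Char)) (k : Nat) : Int := pvW (ss.take k)

lemma pvCumF_add (ss : List (List Char)) (j k : Nat) :
    pvCumF ss (j + k) = pvCumF ss j + pvW ((ss.drop j).take k) := by
  simp [pvCumF, List.take_add]

lemma pvCumF_mono (ss : List (List Char)) {j k : Nat} (h : j ≤ k) :
    pvCumF ss j ≤ pvCumF ss k := by
  have : k = j + (k - j) := by omega
  rw [this, pvCumF_add]
  have := pvW_nonneg ((ss.drop j).take (k - j))
  omega

-- the cum list built by B's pass-2 fold
lemma pv_cum_fold : ∀ (l : List (List Char)) (pre : List Int) (t : Int),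
    (l.foldl (fun (st : List Int × Int) s =>
        let t := st.2 + (s.length : Int) + 1; (st.1 ++ [t], t)) (pre, t)).1
      = pre ++ (List.range l.length).map (fun k => t + pvW (l.take (k + 1))) := by
  intro l
  induction l with
  | nil => simp
  | cons s l ih =>
    intro pre t
    simp only [List.foldl_cons]
    rw [ih]
    simp only [List.length_cons, List.range_succ_eq_map, List.map_cons, List.map_map]
    simp [Function.comp, List.take_succ_cons, add_assoc]

lemma pv_cum_eq (ss : List (List Char)) :
    (ss.foldl (fun (st : List Int × Int) s =>
        let t := st.2 + (s.length : Int) + 1; (st.1 ++ [t], t)) ([0], 0)).1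
      = (List.range (ss.length + 1)).map (pvCumF ss) := by
  rw [pv_cum_fold]
  rw [List.range_succ_eq_map]
  simp [pvCumF, Function.comp]

lemma pv_cumAt (ss : List (List Char)) (m : Nat) (hm : m ≤ ss.length) :
    pvCumAt ((List.range (ss.length + 1)).map (pvCumF ss)) ((m : Nat) : Int)
      = pvCumF ss m := by
  rw [pvCumAt, PySem.List.pyGet?_natCast]
  rw [List.getElem?_map]
  rw [List.getElem?_range (by omega)]
  rfl

-- Source B's binary search returns the boundary e when cum is ≤ target strictly below e
-- and > target from e up
lemma pvBS_eq (cum : List Int) (target e : Int) :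
    ∀ (fuel : Nat) (lo hi : Int), (hi - lo).toNat ≤ fuel → lo ≤ e → e ≤ hi →
      (∀ m, lo ≤ m → m < e → pvCumAt cum m ≤ target) →
      (∀ m, e ≤ m → m < hi → target < pvCumAt cum m) →
      pvBS cum target fuel lo hi = e := by
  intro fuel
  induction fuel with
  | zero =>
    intro lo hi hk hle hge _ _
    simp only [pvBS]
    omega
  | succ fuel ih =>
    intro lo hi hk hle hge h1 h2
    simp only [pvBS]
    by_cases h : lo < hi
    · rw [if_pos h]
      have hb := PySem.Int.floordiv_two_mid_bounds (le_of_lt h)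
      have hlt : PySem.Int.floordiv (lo + hi) 2 < hi :=
        (PySem.Int.floordiv_lt_iff_lt_mul (by omega)).mpr (by omega)
      set mid := PySem.Int.floordiv (lo + hi) 2 with hmid
      by_cases hc : pvCumAt cum mid ≤ target
      · simp only [if_pos hc]
        have hme : mid < e := by
          by_contra hh
          push_neg at hh
          exact absurd hc (not_le.mpr (h2 mid hh hlt))
        exact ih (mid + 1) hi (by omega) (by omega) hge
          (fun m hm1 hm2 => h1 m (by omega) hm2) h2
      · simp only [if_neg hc]
        have hme : e ≤ mid := by
          by_contra hh
          push_neg at hh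
          exact hc (h1 mid hb.1 hh)
        exact ih lo mid (by omega) hle hme h1
          (fun m hm1 hm2 => h2 m hm1 (by omega))
    · rw [if_neg h]
      omega

-- ===== Source B's outer loop computes the greedy segmentation =====

lemma pvOuter_eq (ss : List (List Char)) (b : Int) (cum : List Int)
    (hcum : ∀ m : Nat, m ≤ ss.length → pvCumAt cum ((m : Nat) : Int) = pvCumF ss m) :
    ∀ (fuel iN : Nat), iN ≤ ss.length → ss.length - iN ≤ fuel →
      pvOuterB cum ss b (ss.length : Int) fuel ((iN : Nat) : Int)
        = (pvChop b (ss.drop iN)).map (PySem.Chars.join [' ']) := by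
  intro fuel
  induction fuel with
  | zero =>
    intro iN hiN hk
    rw [List.drop_of_length_le (by omega)]
    simp [pvOuterB, pvChop_nil]
  | succ fuel ih =>
    intro iN hiN hk
    simp only [pvOuterB]
    by_cases hlt : iN < ss.length
    · rw [if_pos (by exact_mod_cast hlt)]
      have hdrop : ss.drop iN = ss[iN] :: ss.drop (iN + 1) := List.drop_eq_getElem_cons hlt
      set s := ss[iN] with hs
      set rest := ss.drop (iN + 1) with hrest
      set c := pvCount b ((s.length : Int) + 1) rest with hc
      have hcle : c ≤ rest.length := pvCount_le b rest _
      have hrl : rest.length = ss.length - (iN + 1) := by simp [hrest]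
      have hw : pvCumF ss (iN + 1) = pvCumF ss iN + ((s.length : Int) + 1) := by
        rw [pvCumF_add ss iN 1, hdrop]
        simp
      have htarget : pvCumAt cum ((iN : Nat) : Int) + b = pvCumF ss iN + b := by
        rw [hcum iN hiN]
      -- value of cum at the end of the group
      have hcend : pvCumF ss (iN + 1 + c) = pvCumF ss (iN + 1) + pvW (rest.take c) := by
        rw [pvCumF_add ss (iN + 1) c, ← hrest]
      have hbound : ∀ mN : Nat, iN + 1 ≤ mN → mN ≤ iN + 1 + c →
          pvCumF ss (iN + 1) ≤ pvCumF ss iN + b → pvCumF ss mN ≤ pvCumF ss iN + b := by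
        intro mN hm1 hm2 hA
        have hmono := pvCumF_mono ss hm2
        have : pvCumF ss (iN + 1 + c) ≤ pvCumF ss iN + b := by
          by_cases hc0 : 0 < c
          · have := pvCount_take b rest ((s.length : Int) + 1) (by rw [← hc] at *; omega)
            rw [← hc] at this
            rw [hcend, hw]
            omega
          · have : c = 0 := by omega
            rw [this] at *
            simpa [hcend, this] using hA
        omega
      have hover : iN + 1 + c < ss.length →
          pvCumF ss iN + b < pvCumF ss (iN + 1 + c + 1) := by
        intro hend
        have hcl : c < rest.length := by omega
        have := pvCount_over b rest ((s.length : Int) + 1) (by rw [← hc] at *; omega)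
        rw [← hc] at this
        have hdec : pvCumF ss (iN + 1 + c + 1) = pvCumF ss (iN + 1) + pvW (rest.take (c + 1)) := by
          have := pvCumF_add ss (iN + 1) (c + 1)
          rw [← hrest] at this
          rw [show iN + 1 + (c + 1) = iN + 1 + c + 1 by omega] at this
          exact this
        rw [hdec, hw]
        omega
      -- the binary search result
      have hbs : pvBS cum (pvCumAt cum ((iN : Nat) : Int) + b)
          (((ss.length : Int) + 1 - (((iN : Nat) : Int) + 1)).toNat) (((iN : Nat) : Int) + 1)
          ((ss.length : Int) + 1) = (((iN + c + 2 : Nat) : Int)) ∨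
          (pvBS cum (pvCumAt cum ((iN : Nat) : Int) + b)
          (((ss.length : Int) + 1 - (((iN : Nat) : Int) + 1)).toNat) (((iN : Nat) : Int) + 1)
          ((ss.length : Int) + 1) = (((iN + 1 : Nat) : Int)) ∧ c = 0) := by
        by_cases hA : pvCumF ss (iN + 1) ≤ pvCumF ss iN + b
        · left
          apply pvBS_eq cum _ _ ((ss.length : Int) + 1 - (((iN : Nat) : Int) + 1)).toNat _ _
            (le_refl _) (by push_cast; omega) (by push_cast; omega)
          · intro m hm1 hm2
            have hm0 : 0 ≤ m := by push_cast at hm1; omega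
            obtain ⟨mN, rfl⟩ := Int.eq_ofNat_of_zero_le hm0
            have hm1' : iN + 1 ≤ mN := by exact_mod_cast hm1
            have hm2' : mN < iN + c + 2 := by exact_mod_cast hm2
            have hmle : mN ≤ ss.length := by omega
            rw [hcum mN hmle, htarget]
            exact hbound mN hm1' (by omega) hA
          · intro m hm1 hm2
            have hm0 : 0 ≤ m := by push_cast at hm1; omega
            obtain ⟨mN, rfl⟩ := Int.eq_ofNat_of_zero_le hm0
            have hm1' : iN + c + 2 ≤ mN := by exact_mod_cast hm1
            have hm2' : mN < ss.length + 1 := by exact_mod_cast hm2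
            have hend : iN + 1 + c < ss.length := by omega
            have := hover hend
            have hmono := pvCumF_mono ss (show iN + 1 + c + 1 ≤ mN by omega)
            rw [hcum mN (by omega), htarget]
            omega
        · right
          have hc0 : c = 0 := by
            by_contra hne
            have hpos : 0 < c := by omega
            have := pvCount_take b rest ((s.length : Int) + 1) (by rw [← hc] at *; omega)
            rw [← hc] at this
            have hWn := pvW_nonneg (rest.take c)
            rw [hw] at hA
            omega
          refine ⟨?_, hc0⟩
          apply pvBS_eq cum _ _ ((ss.length : Int) + 1 - (((iN : Nat) : Int) + 1)).toNat _ _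
            (le_refl _) (by push_cast; omega) (by push_cast; omega)
          · intro m hm1 hm2
            push_cast at hm1 hm2
            omega
          · intro m hm1 hm2
            have hm0 : 0 ≤ m := by push_cast at hm1; omega
            obtain ⟨mN, rfl⟩ := Int.eq_ofNat_of_zero_le hm0
            have hm1' : iN + 1 ≤ mN := by exact_mod_cast hm1
            have hm2' : mN < ss.length + 1 := by exact_mod_cast hm2
            have hmono := pvCumF_mono ss (show iN + 1 ≤ mN from hm1')
            rw [hcum mN (by omega), htarget]
            push_neg at hA
            omega
      -- the group end index
      have hend : max (pvBS cum (pvCumAt cum ((iN : Nat) : Int) + b)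
            (((ss.length : Int) + 1 - (((iN : Nat) : Int) + 1)).toNat) (((iN : Nat) : Int) + 1)
            ((ss.length : Int) + 1) - 1) (((iN : Nat) : Int) + 1)
          = (((iN + 1 + c : Nat) : Int)) := by
        rcases hbs with hbs | ⟨hbs, hc0⟩
        · rw [hbs]; push_cast; omega
        · rw [hbs, hc0]; push_cast; omega
      -- the slice is the group's sentences
      have hslice : PySem.List.slice ss (some ((iN : Nat) : Int)) (some (((iN + 1 + c : Nat) : Int)))
          = s :: rest.take c := by
        rw [PySem.List.slice_natCast]
        rw [show iN + 1 + c - iN = 1 + c by omega]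
        rw [hdrop]
        simp [Nat.add_comm 1 c]
      -- the recursive call
      have hrec : pvOuterB cum ss b (ss.length : Int) fuel (((iN + 1 + c : Nat) : Int))
          = (pvChop b (ss.drop (iN + 1 + c))).map (PySem.Chars.join [' ']) := by
        apply ih (iN + 1 + c) (by omega) (by omega)
      have hdd : ss.drop (iN + 1 + c) = rest.drop c := by
        rw [hrest, List.drop_drop]
      -- zeta-reduce the let-bindings of pvOuterB's body, then rewrite both sides
      simp only [hend, hslice, hrec, hdd]
      rw [hdrop, pvChop_cons, ← hc]
      simp
    · rw [if_neg (by exact_mod_cast hlt)]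
      rw [List.drop_of_length_le (by omega)]
      simp [pvChop_nil]

-- ===== VERDICT (by name: the statement is the Claim_ definition above) =====
theorem split_to_thread_py_spec : Claim_equal_split_to_thread_py := by
  unfold Claim_equal_split_to_thread_py Spec_split_to_thread_py
  intro content max_chars _
  simp only [split_to_thread_py, split_to_thread_py_alt]
  set raws := PySem.Chars.splitOn (PySem.Chars.replace content.toList ['\n'] [' ']) ['.', ' ']
    with hraws
  set ss := raws.filterMap pvNormalize with hss
  have hsent : raws.foldl pvNormStep [] = ss := by
    rw [pv_normStep_filterMap, hss]; simp
  rw [hsent]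
  have hfoldA : raws.foldl (pvStepA max_chars) ([], [])
      = ss.foldl (pvStepA' max_chars) ([], []) := by
    rw [hss, pv_foldl_filterMap]
    congr 1
    funext st x
    exact pv_stepA_eq max_chars st x
  have hgood : ∀ s ∈ ss, pvGood s := by
    intro s hs
    obtain ⟨raw, _, hr⟩ := List.mem_filterMap.mp hs
    exact pv_good_normalize hr
  have hinv := pv_fold_inv max_chars ss (a := ([], [])) (g := ([], [], 0)) hgood
    ⟨rfl, rfl, rfl, by simp⟩
  obtain ⟨h1, h2, h3, h4⟩ := hinv
  set stA := ss.foldl (pvStepA' max_chars) ([], []) with hstA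
  set stG := ss.foldl (pvStepG (max_chars - 10)) ([], [], 0) with hstG
  rw [hfoldA]
  -- A's pre-numbering thread list = joined flushed groups
  have hpre : (if stA.2 ≠ [] then stA.1 ++ [PySem.Chars.strip stA.2] else stA.1)
      = (pvFlushG stG).map (PySem.Chars.join [' ']) := by
    unfold pvFlushG
    by_cases hgrp : stG.2.1 = []
    · have hcur : stA.2 = [] := by rw [h2, hgrp]; simp
      simp [hgrp, hcur, h1]
    · have hjoin := pv_join_good stG.2.1 hgrp h4
      have hcur : stA.2 ≠ [] := by
        rw [h2, hjoin.2]; simp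
      have hstrip : PySem.Chars.strip stA.2 = PySem.Chars.join [' '] stG.2.1 := by
        rw [h2, hjoin.2]; exact pv_strip_append_space hjoin.1
      simp [hgrp, hcur, h1, hstrip]
  -- the flushed groups are the greedy segmentation
  have hchop : pvFlushG stG = pvChop (max_chars - 10) ss := pv_fold_chop_init (max_chars - 10) ss
  -- B's groups are the joined greedy segmentation
  have hcum : (ss.foldl (fun (st : List Int × Int) s =>
      let t := st.2 + (s.length : Int) + 1; (st.1 ++ [t], t)) ([0], 0)).1
      = (List.range (ss.length + 1)).map (pvCumF ss) := pv_cum_eq ss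
  have houter : pvOuterB ((List.range (ss.length + 1)).map (pvCumF ss)) ss (max_chars - 10)
      (ss.length : Int) ss.length ((0 : Nat) : Int)
      = (pvChop (max_chars - 10) ss).map (PySem.Chars.join [' ']) := by
    rw [pvOuter_eq ss (max_chars - 10) _ (fun m hm => pv_cumAt ss m hm) ss.length 0
      (by omega) (by omega)]
    simp
  rw [hpre, hchop, hcum]
  rw [show ((0 : Nat) : Int) = (0 : Int) from rfl] at houter
  rw [houter]
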